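-- pv_equiv track=rewrite | github.com/CodewithWitcher/ClashKingAPI | routers/v2/player/utils.py | estimate_individual_defenses_from_stacked
-- ===== SOURCE A (Python) =====
-- def estimate_individual_defenses_from_stacked(stacked_value: int) -> list[int]:
--     """Unstack a stacked trophy value into individual defense trophy values.
--
--     Args:
--         stacked_value: Cumulative trophy loss value from multiple defenses (typically negative)
--
--     Returns:
--         List of estimated individual defense trophy values
--     """
--     individual_defenses = []
--     remaining = abs(stacked_value)  # Defense values are typically negative, make positive
--
--     # Work backwards from the highest possible values
--     while remaining > 0:
--         if remaining >= 40:
--             individual_defenses.append(40)  # 3-star defense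
--             remaining -= 40
--         elif remaining >= 32:
--             individual_defenses.append(32)  # 2-star defense
--             remaining -= 32
--         elif remaining >= 16:
--             individual_defenses.append(16)  # 2-star defense (low end)
--             remaining -= 16
--         elif remaining >= 15:
--             individual_defenses.append(15)  # 1-star defense
--             remaining -= 15
--         elif remaining > 0:
--             # 1-star defense (5-15 trophies) or 0-star defense (0-4 trophies)
--             individual_defenses.append(remaining)
--             remaining = 0
--
--     return individual_defenses
-- ===== SOURCE B (Python) =====
-- def estimate_individual_defenses_from_stacked(stacked_value: int) -> list[int]:
--     q, rem = divmod(abs(stacked_value), 40)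
--     result = [40] * q
--     if rem >= 32:
--         result.append(32)
--         if rem - 32 > 0:
--             result.append(rem - 32)
--     elif rem >= 16:
--         result.append(16)
--         left = rem - 16
--         if left == 15:
--             result.append(15)
--         elif left > 0:
--             result.append(left)
--     elif rem >= 15:
--         result.append(15)
--     elif rem > 0:
--         result.append(rem)
--     return result
-- ===== Notes on version B (the rewrite author's own statement) =====
-- stated objective: simpler
-- what changed: Replaces the repeated-subtraction greedy loop by a closed-form divmod(abs(v),40) producing [40]*q plus constant-size branch handling of the remainder 0..39.
import Mathlib
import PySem

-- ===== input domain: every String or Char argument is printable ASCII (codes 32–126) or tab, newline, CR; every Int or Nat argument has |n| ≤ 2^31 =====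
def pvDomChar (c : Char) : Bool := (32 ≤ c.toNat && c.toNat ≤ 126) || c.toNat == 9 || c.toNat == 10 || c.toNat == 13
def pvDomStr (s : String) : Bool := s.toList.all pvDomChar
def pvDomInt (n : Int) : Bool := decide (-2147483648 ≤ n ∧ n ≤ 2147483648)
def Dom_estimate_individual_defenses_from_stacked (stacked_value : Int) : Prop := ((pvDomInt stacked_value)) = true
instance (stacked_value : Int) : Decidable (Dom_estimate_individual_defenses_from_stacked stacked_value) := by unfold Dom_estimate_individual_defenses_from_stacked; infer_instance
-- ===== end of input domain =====

-- B replaces A's repeated-subtraction greedy loop with divmod-by-40 plus constant branches on the remainder (objective: simpler).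

-- ===== PORT A =====
-- A's while-loop, as structural recursion on the remaining value.
def pvLoopA (remaining : Int) : List Int :=
  if remaining > 0 then
    if remaining ≥ 40 then 40 :: pvLoopA (remaining - 40)
    else if remaining ≥ 32 then 32 :: pvLoopA (remaining - 32)
    else if remaining ≥ 16 then 16 :: pvLoopA (remaining - 16)
    else if remaining ≥ 15 then 15 :: pvLoopA (remaining - 15)
    else [remaining]
  else []
termination_by remaining.toNat
decreasing_by all_goals omega

def estimate_individual_defenses_from_stacked (stacked_value : Int) : List Int :=
  pvLoopA |stacked_value|

-- ===== PORT B =====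
-- the remainder branches of Source B
def pvTailB (rem : Int) : List Int :=
  if rem ≥ 32 then
    if rem - 32 > 0 then [32, rem - 32] else [32]
  else if rem ≥ 16 then
    let left := rem - 16
    if left = 15 then [16, 15]
    else if left > 0 then [16, left]
    else [16]
  else if rem ≥ 15 then [15]
  else if rem > 0 then [rem]
  else []

def estimate_individual_defenses_from_stacked_alt (stacked_value : Int) : List Int :=
  List.replicate (PySem.Int.floordiv |stacked_value| 40).toNat 40 ++
    pvTailB (PySem.Int.mod |stacked_value| 40)

-- ===== PRECONDITION & SPEC =====
def Spec_estimate_individual_defenses_from_stacked (stacked_value : Int) (out : List Int) : Prop := out = estimate_individual_defenses_from_stacked_alt stacked_value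
instance (stacked_value : Int) (out : List Int) : Decidable (Spec_estimate_individual_defenses_from_stacked stacked_value out) := by unfold Spec_estimate_individual_defenses_from_stacked; infer_instance

-- ===== CLAIM (what is proved, stated in full; the proofs are below) =====
def Claim_equal_estimate_individual_defenses_from_stacked : Prop := ∀ (stacked_value : Int), Dom_estimate_individual_defenses_from_stacked stacked_value → Spec_estimate_individual_defenses_from_stacked stacked_value (estimate_individual_defenses_from_stacked stacked_value)

-- ===== LEMMAS AND PROOFS =====

-- base case: for 0 ≤ rem < 40 the loop computes exactly the remainder branches
theorem pvLoopA_small (rem : Int) (h0 : 0 ≤ rem) (h40 : rem < 40) :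
    pvLoopA rem = pvTailB rem := by
  interval_cases rem <;> simp [pvLoopA, pvTailB]

-- induction on the quotient: the loop peels off k forties then runs the small case
theorem pvLoopA_decompose (k : Nat) (rem : Int) (h0 : 0 ≤ rem) (h40 : rem < 40) :
    pvLoopA (40 * k + rem) = List.replicate k 40 ++ pvTailB rem := by
  induction k with
  | zero =>
    have h : (40 : Int) * (0 : Nat) + rem = rem := by push_cast; ring
    rw [h, List.replicate_zero, List.nil_append]
    exact pvLoopA_small rem h0 h40
  | succ n ih =>
    rw [pvLoopA]
    split_ifs with hp h40
    · have h3 : (40 : Int) * (↑(n + 1) : Int) + rem - 40 = 40 * (n : Int) + rem := by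
        push_cast; ring
      rw [h3, ih, List.replicate_succ, List.cons_append]
    all_goals (exfalso; push_cast at hp h40 ⊢; omega)

-- ===== VERDICT (by name: the statement is the Claim_ definition above) =====
theorem estimate_individual_defenses_from_stacked_spec : Claim_equal_estimate_individual_defenses_from_stacked := by
  intro v _
  unfold Spec_estimate_individual_defenses_from_stacked
  unfold estimate_individual_defenses_from_stacked estimate_individual_defenses_from_stacked_alt
  set a : Int := |v| with ha
  have ha0 : 0 ≤ a := abs_nonneg v
  have hq : PySem.Int.floordiv a 40 = a / 40 := by
    simp [PySem.Int.floordiv, Int.fdiv_eq_ediv_of_nonneg a (by norm_num : (0:Int) ≤ 40)]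
  have hr : PySem.Int.mod a 40 = a % 40 := by
    simp [PySem.Int.mod, Int.fmod_eq_emod_of_nonneg a (by norm_num : (0:Int) ≤ 40)]
  rw [hq, hr]
  have hk : a = 40 * (a / 40).toNat + a % 40 := by omega
  rw [← pvLoopA_decompose (a / 40).toNat (a % 40) (by omega) (by omega), ← hk]
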